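-- pv_equiv track=rewrite | github.com/stanleymay20/scrollintel-ai-system | scrollintel_core/agents/cto_agent.py | _get_compliance_recommendations
-- ===== SOURCE A (Python) =====
-- from typing import List, Dict, Any, Optional
--
-- def _get_compliance_recommendations(requirements: List[str]) -> Dict[str, Any]:
--     """Get compliance-specific recommendations"""
--     recommendations = {}
--
--     if "gdpr" in [r.lower() for r in requirements]:
--         recommendations["gdpr"] = {
--             "data_protection": "Implement data encryption and access controls",
--             "privacy": "Data minimization, consent management, right to deletion",
--             "documentation": "Maintain data processing records and privacy policies"
--         }
--
--     if "soc2" in [r.lower() for r in requirements]: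
--         recommendations["soc2"] = {
--             "security": "Access controls, encryption, vulnerability management",
--             "availability": "Monitoring, incident response, business continuity",
--             "processing_integrity": "Data validation, error handling, quality controls"
--         }
--
--     if not recommendations:
--         recommendations["general"] = {
--             "security": "Implement basic security best practices",
--             "monitoring": "Log access and changes for audit trails",
--             "backup": "Regular backups and disaster recovery planning"
--         }
--
--     return recommendations
-- ===== SOURCE B (Python) =====
-- from typing import List, Dict, Any
--
-- GDPR = {
--     "data_protection": "Implement data encryption and access controls",
--     "privacy": "Data minimization, consent management, right to deletion",
--     "documentation": "Maintain data processing records and privacy policies",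
-- }
-- SOC2 = {
--     "security": "Access controls, encryption, vulnerability management",
--     "availability": "Monitoring, incident response, business continuity",
--     "processing_integrity": "Data validation, error handling, quality controls",
-- }
-- GENERAL = {
--     "security": "Implement basic security best practices",
--     "monitoring": "Log access and changes for audit trails",
--     "backup": "Regular backups and disaster recovery planning",
-- }
--
--
-- def _get_compliance_recommendations(requirements: List[str]) -> Dict[str, Any]:
--     """Get compliance-specific recommendations"""
--     # one short-circuiting pass: lower each item once, stop once both flags hold
--     gdpr = soc2 = False
--     for r in requirements:
--         if gdpr and soc2:
--             break
--         rl = r.lower()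
--         gdpr = gdpr or rl == "gdpr"
--         soc2 = soc2 or rl == "soc2"
--     pairs = ([("gdpr", GDPR)] if gdpr else []) + ([("soc2", SOC2)] if soc2 else [])
--     return dict(pairs or [("general", GENERAL)])
-- ===== Notes on version B (the rewrite author's own statement) =====
-- stated objective: alternative
-- what changed: Instead of A's two staged passes (each membership test rebuilds the full lowered list) and in-place dict mutation, B makes one short-circuiting scan that lowers each requirement once while accumulating two boolean flags (stopping early once both are set), then assembles the result functionally by concatenating pair fragments and converting to a dict, with the fallback expressed as 'pairs or [...]'.
import Mathlib
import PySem

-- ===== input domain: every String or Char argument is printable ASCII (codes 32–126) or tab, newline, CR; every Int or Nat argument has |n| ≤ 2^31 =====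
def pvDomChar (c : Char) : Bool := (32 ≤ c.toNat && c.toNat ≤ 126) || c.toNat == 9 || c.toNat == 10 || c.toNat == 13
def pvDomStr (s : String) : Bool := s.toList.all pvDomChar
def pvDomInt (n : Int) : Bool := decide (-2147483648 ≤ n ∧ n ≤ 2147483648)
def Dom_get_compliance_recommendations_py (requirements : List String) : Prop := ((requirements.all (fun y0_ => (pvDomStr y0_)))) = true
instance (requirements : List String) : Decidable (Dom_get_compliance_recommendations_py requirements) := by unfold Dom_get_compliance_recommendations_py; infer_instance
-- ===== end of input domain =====

-- B replaces A's two staged membership passes over a rebuilt lowered list and dict mutation by one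
-- short-circuiting flag-accumulating scan plus functional assembly from pair fragments; objective:
-- alternative. Return values proved equal.

-- ===== PORT A =====
def get_compliance_recommendations_py (requirements : List String) : List (String × List (String × String)) :=
  let recommendations : PySem.Dict String (List (String × String)) := PySem.Dict.empty
  let recommendations :=
    if (requirements.map PySem.Str.lower).contains "gdpr" then
      recommendations.insert "gdpr"
        [("data_protection", "Implement data encryption and access controls"),
         ("privacy", "Data minimization, consent management, right to deletion"),
         ("documentation", "Maintain data processing records and privacy policies")]
    else recommendations
  let recommendations :=
    if (requirements.map PySem.Str.lower).contains "soc2" then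
      recommendations.insert "soc2"
        [("security", "Access controls, encryption, vulnerability management"),
         ("availability", "Monitoring, incident response, business continuity"),
         ("processing_integrity", "Data validation, error handling, quality controls")]
    else recommendations
  let recommendations :=
    if recommendations.size = 0 then
      recommendations.insert "general"
        [("security", "Implement basic security best practices"),
         ("monitoring", "Log access and changes for audit trails"),
         ("backup", "Regular backups and disaster recovery planning")]
    else recommendations
  recommendations.items

-- ===== PORT B =====
def pvGDPR : List (String × String) :=
  [("data_protection", "Implement data encryption and access controls"),
   ("privacy", "Data minimization, consent management, right to deletion"),
   ("documentation", "Maintain data processing records and privacy policies")]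

def pvSOC2 : List (String × String) :=
  [("security", "Access controls, encryption, vulnerability management"),
   ("availability", "Monitoring, incident response, business continuity"),
   ("processing_integrity", "Data validation, error handling, quality controls")]

def pvGENERAL : List (String × String) :=
  [("security", "Implement basic security best practices"),
   ("monitoring", "Log access and changes for audit trails"),
   ("backup", "Regular backups and disaster recovery planning")]

-- the single short-circuiting scan of Source B: lowers each item once, stops once both flags hold
def pvScan : List String → Bool → Bool → Bool × Bool
  | [], gdpr, soc2 => (gdpr, soc2)
  | r :: rest, gdpr, soc2 =>
    if gdpr && soc2 then (gdpr, soc2)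
    else
      let rl := PySem.Str.lower r
      pvScan rest (gdpr || rl == "gdpr") (soc2 || rl == "soc2")

def get_compliance_recommendations_py_alt (requirements : List String) : List (String × List (String × String)) :=
  let (gdpr, soc2) := pvScan requirements false false
  let pairs := (if gdpr then [("gdpr", pvGDPR)] else []) ++ (if soc2 then [("soc2", pvSOC2)] else [])
  if pairs.isEmpty then [("general", pvGENERAL)] else pairs

-- ===== PRECONDITION & SPEC =====
def Spec_get_compliance_recommendations_py (requirements : List String) (out : List (String × List (String × String))) : Prop := out = get_compliance_recommendations_py_alt requirements
instance (requirements : List String) (out : List (String × List (String × String))) : Decidable (Spec_get_compliance_recommendations_py requirements out) := by unfold Spec_get_compliance_recommendations_py; infer_instance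

-- ===== CLAIM (what is proved, stated in full; the proofs are below) =====
def Claim_equal_get_compliance_recommendations_py : Prop := ∀ (requirements : List String), Dom_get_compliance_recommendations_py requirements → Spec_get_compliance_recommendations_py requirements (get_compliance_recommendations_py requirements)

-- ===== LEMMAS AND PROOFS =====
theorem pv_beq_swap (a b : String) : (a == b) = decide (b = a) := by
  by_cases h : a = b
  · subst h; simp
  · have h2 : ¬ b = a := fun e => h e.symm
    simp [h, h2]

theorem pvScan_eq (L : List String) (g s : Bool) :
    pvScan L g s = (g || (L.map PySem.Str.lower).contains "gdpr",
                    s || (L.map PySem.Str.lower).contains "soc2") := by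
  induction L generalizing g s with
  | nil => simp [pvScan]
  | cons r rest ih =>
    by_cases h : g && s
    · rcases Bool.and_eq_true_iff.mp h with ⟨hg, hs⟩
      subst hg; subst hs
      simp [pvScan]
    · simp only [pvScan, h, Bool.false_eq_true, reduceIte, ih]
      simp [List.contains_cons, Bool.or_assoc, pv_beq_swap]

-- ===== VERDICT (by name: the statement is the Claim_ definition above) =====
theorem get_compliance_recommendations_py_spec : Claim_equal_get_compliance_recommendations_py := by
  intro requirements _
  unfold Spec_get_compliance_recommendations_py
  unfold get_compliance_recommendations_py get_compliance_recommendations_py_alt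
  rw [pvScan_eq]
  by_cases hg : (requirements.map PySem.Str.lower).contains "gdpr" = true <;>
  by_cases hs : (requirements.map PySem.Str.lower).contains "soc2" = true <;>
    simp only [hg, hs] <;> decide
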